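-- pv_equiv track=rewrite | github.com/DancingOnAir/LeetcodePythonSolution | BinarySearch/2555_maximize_win_from_two_segments.py | maximizeWin1
-- ===== SOURCE A (Python) =====
-- from typing import List
-- from bisect import bisect_right
--
-- def maximizeWin1(prizePositions: List[int], k: int) -> int:
--     n = len(prizePositions)
--     dp = [0] * (n + 1)
--     res = 0
--     for i, v in enumerate(prizePositions):
--         j = bisect_right(prizePositions, v - k - 1)
--         dp[i + 1] = max(dp[i], i - j + 1)
--         res = max(res, i - j + 1 + dp[j])
--
--     return res
-- ===== SOURCE B (Python) =====
-- from typing import List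
-- from bisect import bisect_right
--
-- def maximizeWin1(prizePositions: List[int], k: int) -> int:
--     n = len(prizePositions)
--     # segment start of the largest prize window ending at each index
--     starts = [bisect_right(prizePositions, p - k - 1) for p in prizePositions]
--     # bucket[m]: the best window among those whose segment starts at index m
--     bucket = [0] * (n + 1)
--     for i, j in enumerate(starts):
--         bucket[j] = max(bucket[j], i - j + 1)
--     # suffix maxima over the buckets: the best window starting at or after each index
--     suf = [0] * (n + 2)
--     for m in range(n, -1, -1):
--         suf[m] = max(suf[m + 1], bucket[m])
--     # pair each window with the best window starting after the index where it ends
--     res = 0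
--     for i, j in enumerate(starts):
--         res = max(res, i - j + 1 + suf[i + 1])
--     return res
-- ===== Notes on version B (the rewrite author's own statement) =====
-- stated objective: alternative
-- what changed: Inverts A's pairing: instead of an online dp array whose prefix-best is written and read back inside the single loop, B buckets each window by the index its segment starts at, builds a suffix-maximum array over the buckets in a backward pass, and pairs each window with the best window starting after its end.
import Mathlib
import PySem

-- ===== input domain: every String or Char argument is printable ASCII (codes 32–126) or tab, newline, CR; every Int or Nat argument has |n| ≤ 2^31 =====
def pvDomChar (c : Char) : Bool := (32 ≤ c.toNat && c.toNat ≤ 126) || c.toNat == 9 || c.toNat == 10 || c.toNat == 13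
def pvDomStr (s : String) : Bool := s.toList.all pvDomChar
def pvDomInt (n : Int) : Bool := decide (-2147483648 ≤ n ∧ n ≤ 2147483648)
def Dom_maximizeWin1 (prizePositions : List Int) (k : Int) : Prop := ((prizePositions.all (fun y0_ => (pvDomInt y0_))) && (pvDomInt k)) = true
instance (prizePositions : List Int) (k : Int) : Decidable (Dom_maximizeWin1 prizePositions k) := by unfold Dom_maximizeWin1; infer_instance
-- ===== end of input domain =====

-- B inverts A's pairing: windows bucketed by segment start + a backward suffix-maximum
-- pass replace A's online dp array; same value on every input.

-- ===== PORT A =====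
-- the for-loop of A: state (i, dp, res); dp[i+1] written before dp[j] is read, as in Python
def loopA (pp : List Int) (k : Int) : List Int → Nat → List Int → Int → Int
  | [], _, _, res => res
  | v :: rest, i, dp, res =>
    let j := PySem.List.bisectRight pp (v - k - 1)
    let dp' := dp.set (i + 1) (max (dp.getD i 0) ((i : Int) - (j : Int) + 1))
    loopA pp k rest (i + 1) dp' (max res ((i : Int) - (j : Int) + 1 + dp'.getD j 0))

def maximizeWin1 (prizePositions : List Int) (k : Int) : Int :=
  loopA prizePositions k prizePositions 0 (List.replicate (prizePositions.length + 1) 0) 0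

-- ===== PORT B =====
-- the 'starts' comprehension, and the three passes of B
-- bucket pass: state (i, bucket); bucket[j] is read then written (j = bisect ≤ n, in range)
def loopBk : List Nat → Nat → List Int → List Int
  | [], _, bucket => bucket
  | j :: rest, i, bucket =>
    loopBk rest (i + 1) (bucket.set j (max (bucket.getD j 0) ((i : Int) - (j : Int) + 1)))

-- suffix pass: 'for m in range(n, -1, -1)', counted down by the last argument minus one
def loopB2 (bucket : List Int) (suf : List Int) : Nat → List Int
  | 0 => suf
  | m + 1 => loopB2 bucket (suf.set m (max (suf.getD (m + 1) 0) (bucket.getD m 0))) m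

-- pairing pass: state (i, res) over the starts list
def loopB3 (suf : List Int) : List Nat → Nat → Int → Int
  | [], _, res => res
  | j :: rest, i, res =>
    loopB3 suf rest (i + 1) (max res ((i : Int) - (j : Int) + 1 + suf.getD (i + 1) 0))

def maximizeWin1_alt (prizePositions : List Int) (k : Int) : Int :=
  let n := prizePositions.length
  let starts := prizePositions.map (fun p => PySem.List.bisectRight prizePositions (p - k - 1))
  let bucket := loopBk starts 0 (List.replicate (n + 1) 0)
  let suf := loopB2 bucket (List.replicate (n + 2) 0) (n + 1)
  loopB3 suf starts 0 0

-- ===== PRECONDITION & SPEC =====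
def Spec_maximizeWin1 (prizePositions : List Int) (k : Int) (out : Int) : Prop := out = maximizeWin1_alt prizePositions k
instance (prizePositions : List Int) (k : Int) (out : Int) : Decidable (Spec_maximizeWin1 prizePositions k out) := by unfold Spec_maximizeWin1; infer_instance

-- ===== CLAIM (what is proved, stated in full; the proofs are below) =====
def Claim_equal_maximizeWin1 : Prop := ∀ (prizePositions : List Int) (k : Int), Dom_maximizeWin1 prizePositions k → Spec_maximizeWin1 prizePositions k (maximizeWin1 prizePositions k)

-- ===== LEMMAS AND PROOFS =====

-- the bisection point and size of the window ending at index i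
def Jf (pp : List Int) (k : Int) (i : Nat) : Nat :=
  PySem.List.bisectRight pp (pp.getD i 0 - k - 1)

def Wf (pp : List Int) (k : Int) (i : Nat) : Int := (i : Int) - (Jf pp k i : Int) + 1

-- A's dp prefix maximum, its dp read, and its running result
def Pf (pp : List Int) (k : Int) : Nat → Int
  | 0 => 0
  | m + 1 => max (Pf pp k m) (Wf pp k m)

def Dx (pp : List Int) (k : Int) (i : Nat) : Int :=
  if Jf pp k i ≤ i + 1 then Pf pp k (Jf pp k i) else 0

def RA (pp : List Int) (k : Int) : Nat → Int
  | 0 => 0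
  | i + 1 => max (RA pp k i) (Wf pp k i + Dx pp k i)

-- B's bucket contents, suffix maxima, and running result
def bk (pp : List Int) (k : Int) : Nat → Nat → Int
  | 0, _ => 0
  | i + 1, m => if Jf pp k i = m then max (bk pp k i m) (Wf pp k i) else bk pp k i m

def SUF (pp : List Int) (k : Int) (m : Nat) : Int :=
  if pp.length + 1 ≤ m then 0
  else max (SUF pp k (m + 1)) (bk pp k pp.length m)
termination_by pp.length + 1 - m
decreasing_by omega

def RB (pp : List Int) (k : Int) : Nat → Int
  | 0 => 0
  | i + 1 => max (RB pp k i) (Wf pp k i + SUF pp k (i + 1))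

-- bisect_right never exceeds the list length (no sortedness needed)
lemma brl_le (xs : List Int) (x : Int) :
    ∀ fuel lo hi, lo ≤ hi → PySem.List.bisectRightLoop xs x fuel lo hi ≤ hi := by
  intro fuel
  induction fuel with
  | zero => intro lo hi h; simpa [PySem.List.bisectRightLoop] using h
  | succ m ih =>
    intro lo hi h
    rw [PySem.List.bisectRightLoop]
    by_cases hlt : lo < hi
    · rw [if_pos hlt]
      cases hget : xs[(lo + hi) / 2]? with
      | none => simpa using h
      | some y =>
        simp only
        by_cases hxy : x < y
        · rw [if_pos hxy]
          exact le_trans (ih lo ((lo + hi) / 2) (by omega)) (by omega)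
        · rw [if_neg hxy]
          exact ih ((lo + hi) / 2 + 1) hi (by omega)
    · rw [if_neg hlt]; exact h

lemma bisect_le (xs : List Int) (x : Int) : PySem.List.bisectRight xs x ≤ xs.length :=
  brl_le xs x xs.length 0 xs.length (by omega)

lemma Jf_le (pp : List Int) (k : Int) (i : Nat) : Jf pp k i ≤ pp.length :=
  bisect_le pp (pp.getD i 0 - k - 1)

-- facts about A's prefix maximum
lemma Pf_nonneg (pp : List Int) (k : Int) : ∀ m, 0 ≤ Pf pp k m
  | 0 => le_refl 0
  | m + 1 => le_trans (Pf_nonneg pp k m) (le_max_left _ _)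

lemma Pf_ge (pp : List Int) (k : Int) : ∀ m t, t < m → Wf pp k t ≤ Pf pp k m := by
  intro m
  induction m with
  | zero => intro t h; omega
  | succ m ih =>
    intro t h
    rcases Nat.lt_or_ge t m with h' | h'
    · exact le_trans (ih t h') (le_max_left _ _)
    · have : t = m := by omega
      subst this; exact le_max_right _ _

lemma Pf_cases (pp : List Int) (k : Int) :
    ∀ m, Pf pp k m = 0 ∨ ∃ t, t < m ∧ Pf pp k m = Wf pp k t := by
  intro m
  induction m with
  | zero => exact Or.inl rfl
  | succ m ih =>
    rcases max_choice (Pf pp k m) (Wf pp k m) with h | h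
    · rcases ih with h' | ⟨t, ht, h'⟩
      · exact Or.inl (by rw [show Pf pp k (m+1) = max (Pf pp k m) (Wf pp k m) from rfl, h, h'])
      · exact Or.inr ⟨t, by omega, by rw [show Pf pp k (m+1) = max (Pf pp k m) (Wf pp k m) from rfl, h, h']⟩
    · exact Or.inr ⟨m, by omega, by rw [show Pf pp k (m+1) = max (Pf pp k m) (Wf pp k m) from rfl, h]⟩

lemma Dx_nonneg (pp : List Int) (k : Int) (i : Nat) : 0 ≤ Dx pp k i := by
  unfold Dx
  split_ifs
  · exact Pf_nonneg pp k _
  · exact le_refl 0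

-- facts about B's buckets
lemma bk_ge (pp : List Int) (k : Int) :
    ∀ i t, t < i → Wf pp k t ≤ bk pp k i (Jf pp k t) := by
  intro i
  induction i with
  | zero => intro t h; omega
  | succ i ih =>
    intro t h
    show Wf pp k t ≤ if Jf pp k i = Jf pp k t then max (bk pp k i (Jf pp k t)) (Wf pp k i) else bk pp k i (Jf pp k t)
    rcases Nat.lt_or_ge t i with h' | h'
    · split_ifs
      · exact le_trans (ih t h') (le_max_left _ _)
      · exact ih t h'
    · have : t = i := by omega
      subst this
      rw [if_pos rfl]
      exact le_max_right _ _

lemma bk_cases (pp : List Int) (k : Int) :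
    ∀ i m, bk pp k i m = 0 ∨ ∃ t, t < i ∧ Jf pp k t = m ∧ bk pp k i m = Wf pp k t := by
  intro i
  induction i with
  | zero => intro m; exact Or.inl rfl
  | succ i ih =>
    intro m
    by_cases hm : Jf pp k i = m
    · have hstep : bk pp k (i + 1) m = max (bk pp k i m) (Wf pp k i) := by
        show (if Jf pp k i = m then max (bk pp k i m) (Wf pp k i) else bk pp k i m) = _
        rw [if_pos hm]
      rcases max_choice (bk pp k i m) (Wf pp k i) with h | h
      · rcases ih m with h' | ⟨t, ht, htm, h'⟩
        · exact Or.inl (by rw [hstep, h, h'])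
        · exact Or.inr ⟨t, by omega, htm, by rw [hstep, h, h']⟩
      · exact Or.inr ⟨i, by omega, hm, by rw [hstep, h]⟩
    · have hstep : bk pp k (i + 1) m = bk pp k i m := by
        show (if Jf pp k i = m then max (bk pp k i m) (Wf pp k i) else bk pp k i m) = _
        rw [if_neg hm]
      rcases ih m with h' | ⟨t, ht, htm, h'⟩
      · exact Or.inl (by rw [hstep, h'])
      · exact Or.inr ⟨t, by omega, htm, by rw [hstep, h']⟩

-- facts about the suffix maxima
lemma SUF_high (pp : List Int) (k : Int) (m : Nat) (h : pp.length + 1 ≤ m) :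
    SUF pp k m = 0 := by rw [SUF, if_pos h]

lemma SUF_low (pp : List Int) (k : Int) (m : Nat) (h : m ≤ pp.length) :
    SUF pp k m = max (SUF pp k (m + 1)) (bk pp k pp.length m) := by
  rw [SUF, if_neg (by omega)]

lemma SUF_nonneg (pp : List Int) (k : Int) : ∀ m, 0 ≤ SUF pp k m := by
  intro m
  induction hd : pp.length + 1 - m generalizing m with
  | zero => rw [SUF_high pp k m (by omega)]
  | succ d ih =>
    rw [SUF_low pp k m (by omega)]
    exact le_trans (ih (m + 1) (by omega)) (le_max_left _ _)

lemma SUF_ge (pp : List Int) (k : Int) (i : Nat) (hi : i < pp.length) :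
    ∀ m, m ≤ Jf pp k i → Wf pp k i ≤ SUF pp k m := by
  intro m hm
  induction hd : Jf pp k i - m generalizing m with
  | zero =>
    have : m = Jf pp k i := by omega
    subst this
    rw [SUF_low pp k _ (Jf_le pp k i)]
    exact le_trans (bk_ge pp k pp.length i hi) (le_max_right _ _)
  | succ d ih =>
    rw [SUF_low pp k m (by have := Jf_le pp k i; omega)]
    exact le_trans (ih (m + 1) (by omega) (by omega)) (le_max_left _ _)

lemma SUF_cases (pp : List Int) (k : Int) :
    ∀ m, SUF pp k m = 0 ∨ ∃ t, t < pp.length ∧ m ≤ Jf pp k t ∧ SUF pp k m = Wf pp k t := by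
  intro m
  induction hd : pp.length + 1 - m generalizing m with
  | zero => exact Or.inl (SUF_high pp k m (by omega))
  | succ d ih =>
    have hstep := SUF_low pp k m (by omega)
    rcases max_choice (SUF pp k (m + 1)) (bk pp k pp.length m) with h | h
    · rcases ih (m + 1) (by omega) with h' | ⟨t, ht, htm, h'⟩
      · exact Or.inl (by rw [hstep, h, h'])
      · exact Or.inr ⟨t, ht, by omega, by rw [hstep, h, h']⟩
    · rcases bk_cases pp k pp.length m with h' | ⟨t, ht, htm, h'⟩
      · exact Or.inl (by rw [hstep, h, h'])
      · exact Or.inr ⟨t, ht, by omega, by rw [hstep, h, h']⟩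

-- facts about the two running results
lemma RA_mono (pp : List Int) (k : Int) (i : Nat) : ∀ i', i ≤ i' → RA pp k i ≤ RA pp k i' := by
  intro i'
  induction i' with
  | zero => intro h; have : i = 0 := by omega
            subst this; exact le_refl _
  | succ m ih =>
    intro h
    rcases Nat.lt_or_ge i (m + 1) with h' | h'
    · exact le_trans (ih (by omega)) (le_max_left _ _)
    · have : i = m + 1 := by omega
      subst this; exact le_refl _

lemma RB_mono (pp : List Int) (k : Int) (i : Nat) : ∀ i', i ≤ i' → RB pp k i ≤ RB pp k i' := by
  intro i'
  induction i' with
  | zero => intro h; have : i = 0 := by omega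
            subst this; exact le_refl _
  | succ m ih =>
    intro h
    rcases Nat.lt_or_ge i (m + 1) with h' | h'
    · exact le_trans (ih (by omega)) (le_max_left _ _)
    · have : i = m + 1 := by omega
      subst this; exact le_refl _

lemma RA_nonneg (pp : List Int) (k : Int) (i : Nat) : 0 ≤ RA pp k i :=
  RA_mono pp k 0 i (by omega)

lemma RB_nonneg (pp : List Int) (k : Int) (i : Nat) : 0 ≤ RB pp k i :=
  RB_mono pp k 0 i (by omega)

lemma RA_ge_term (pp : List Int) (k : Int) (i : Nat) (hi : i < pp.length) :
    Wf pp k i + Dx pp k i ≤ RA pp k pp.length :=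
  le_trans (le_max_right (RA pp k i) _) (RA_mono pp k (i + 1) pp.length (by omega))

lemma RB_ge_term (pp : List Int) (k : Int) (i : Nat) (hi : i < pp.length) :
    Wf pp k i + SUF pp k (i + 1) ≤ RB pp k pp.length :=
  le_trans (le_max_right (RB pp k i) _) (RB_mono pp k (i + 1) pp.length (by omega))

lemma W_le_RA (pp : List Int) (k : Int) (i : Nat) (hi : i < pp.length) :
    Wf pp k i ≤ RA pp k pp.length := by
  have h1 : Wf pp k i ≤ Wf pp k i + Dx pp k i := by
    have := Dx_nonneg pp k i; omega
  exact le_trans h1 (RA_ge_term pp k i hi)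

lemma W_le_RB (pp : List Int) (k : Int) (i : Nat) (hi : i < pp.length) :
    Wf pp k i ≤ RB pp k pp.length := by
  have h1 : Wf pp k i ≤ Wf pp k i + SUF pp k (i + 1) := by
    have := SUF_nonneg pp k (i + 1); omega
  exact le_trans h1 (RB_ge_term pp k i hi)

-- the two running results agree: every term of one is dominated by the other's final value
lemma RA_le_RB (pp : List Int) (k : Int) : ∀ m, m ≤ pp.length → RA pp k m ≤ RB pp k pp.length := by
  intro m
  induction m with
  | zero => intro _; exact RB_nonneg pp k pp.length
  | succ i ih =>
    intro h
    have hi : i < pp.length := by omega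
    apply max_le (ih (by omega))
    unfold Dx
    split_ifs with hc
    · rcases Pf_cases pp k (Jf pp k i) with h0 | ⟨t, ht, heq⟩
      · rw [h0]
        simpa using W_le_RB pp k i hi
      · rw [heq]
        have h1 : Wf pp k i ≤ SUF pp k (t + 1) := SUF_ge pp k i hi (t + 1) (by omega)
        have h2 : Wf pp k t + SUF pp k (t + 1) ≤ RB pp k pp.length :=
          RB_ge_term pp k t (by omega)
        omega
    · simpa using W_le_RB pp k i hi

lemma RB_le_RA (pp : List Int) (k : Int) : ∀ m, m ≤ pp.length → RB pp k m ≤ RA pp k pp.length := by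
  intro m
  induction m with
  | zero => intro _; exact RA_nonneg pp k pp.length
  | succ i ih =>
    intro h
    have hi : i < pp.length := by omega
    apply max_le (ih (by omega))
    rcases SUF_cases pp k (i + 1) with h0 | ⟨t, ht, htm, heq⟩
    · rw [h0]
      simpa using W_le_RA pp k i hi
    · rw [heq]
      by_cases hc : Jf pp k t ≤ t + 1
      · have h1 : Wf pp k i ≤ Pf pp k (Jf pp k t) := Pf_ge pp k (Jf pp k t) i (by omega)
        have h2 : Wf pp k t + Dx pp k t ≤ RA pp k pp.length := RA_ge_term pp k t ht
        have h3 : Dx pp k t = Pf pp k (Jf pp k t) := by unfold Dx; rw [if_pos hc]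
        omega
      · have h1 : Wf pp k t ≤ 0 := by
          unfold Wf
          have : (t : Int) + 1 < (Jf pp k t : Int) := by exact_mod_cast (by omega : t + 1 < Jf pp k t)
          omega
        have h2 : Wf pp k i ≤ RA pp k pp.length := W_le_RA pp k i hi
        omega

lemma RA_eq_RB (pp : List Int) (k : Int) : RA pp k pp.length = RB pp k pp.length :=
  le_antisymm (RA_le_RB pp k pp.length (le_refl _)) (RB_le_RA pp k pp.length (le_refl _))

-- characterisation of A's loop
lemma loopA_eq (pp : List Int) (k : Int) :
    ∀ (rest : List Int) (i : Nat) (dp : List Int),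
      rest = pp.drop i → i + rest.length = pp.length → dp.length = pp.length + 1 →
      (∀ m, dp.getD m 0 = if m ≤ i then Pf pp k m else 0) →
      loopA pp k rest i dp (RA pp k i) = RA pp k pp.length := by
  intro rest
  induction rest with
  | nil =>
    intro i dp hrest hlen _ _
    have : i = pp.length := by simp at hlen; omega
    subst this; rfl
  | cons v t ih =>
    intro i dp hrest hlen hdplen hdp
    have hi : i < pp.length := by simp at hlen; omega
    have hv : v = pp.getD i 0 := by
      have h0 : (pp.drop i)[0]? = some v := by rw [← hrest]; rfl
      rw [List.getElem?_drop, List.getElem?_eq_getElem (by omega)] at h0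
      rw [List.getD_eq_getElem pp 0 hi]
      simpa using h0.symm
    have ht : t = pp.drop (i + 1) := by
      have := congrArg List.tail hrest
      simpa [List.tail_drop] using this
    rw [loopA]
    have hj : PySem.List.bisectRight pp (v - k - 1) = Jf pp k i := by
      rw [hv]; rfl
    rw [hj]
    have hdpi : dp.getD i 0 = Pf pp k i := by rw [hdp i, if_pos (le_refl i)]
    rw [hdpi]
    have hW : (i : Int) - (Jf pp k i : Int) + 1 = Wf pp k i := rfl
    rw [hW]
    set dp' := dp.set (i + 1) (max (Pf pp k i) (Wf pp k i)) with hdp'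
    have hdpinv : ∀ m, dp'.getD m 0 = if m ≤ i + 1 then Pf pp k m else 0 := by
      intro m
      by_cases hm : m = i + 1
      · subst hm
        rw [hdp']
        have hlt : i + 1 < dp.length := by omega
        simp only [List.getD, List.getElem?_set_self hlt, Option.getD_some]
        rw [show max (Pf pp k i) (Wf pp k i) = Pf pp k (i + 1) from rfl, if_pos (le_refl _)]
      · have : dp'.getD m 0 = dp.getD m 0 := by
          rw [hdp']
          simp [List.getD, List.getElem?_set_ne (by omega : i + 1 ≠ m)]
        rw [this, hdp m]
        rcases Nat.lt_trichotomy m (i + 1) with h | h | h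
        · rw [if_pos (by omega), if_pos (by omega)]
        · omega
        · rw [if_neg (by omega), if_neg (by omega)]
    have hread : dp'.getD (Jf pp k i) 0 = Dx pp k i := by
      rw [hdpinv (Jf pp k i)]
      unfold Dx
      split_ifs <;> rfl
    rw [hread]
    have hRA : max (RA pp k i) (Wf pp k i + Dx pp k i) = RA pp k (i + 1) := rfl
    rw [hRA]
    exact ih (i + 1) dp' ht (by simp at hlen ⊢; omega) (by simp [hdp', hdplen]) hdpinv

-- the starts list reads off Jf at each index
def Lst (pp : List Int) (k : Int) : List Nat :=
  pp.map (fun p => PySem.List.bisectRight pp (p - k - 1))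

lemma Lst_length (pp : List Int) (k : Int) : (Lst pp k).length = pp.length := by
  simp [Lst]

lemma Lst_getElem (pp : List Int) (k : Int) (i : Nat) (hi : i < pp.length) :
    (Lst pp k)[i]'(by simp [Lst]; omega) = Jf pp k i := by
  simp only [Lst, List.getElem_map]
  rw [Jf, List.getD_eq_getElem pp 0 hi]

-- characterisation of B's bucket pass
lemma loopBk_eq (pp : List Int) (k : Int) :
    ∀ (rest : List Nat) (i : Nat) (bucket : List Int),
      rest = (Lst pp k).drop i → i + rest.length = pp.length →
      bucket.length = pp.length + 1 →
      (∀ m, bucket.getD m 0 = bk pp k i m) →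
      ∀ m, (loopBk rest i bucket).getD m 0 = bk pp k pp.length m := by
  intro rest
  induction rest with
  | nil =>
    intro i bucket hrest hlen _ hb
    have : i = pp.length := by simp at hlen; omega
    subst this
    exact fun m => hb m
  | cons j t ih =>
    intro i bucket hrest hlen hblen hb
    have hi : i < pp.length := by simp at hlen; omega
    have hj : j = Jf pp k i := by
      have h0 : ((Lst pp k).drop i)[0]? = some j := by rw [← hrest]; rfl
      rw [List.getElem?_drop, List.getElem?_eq_getElem (by rw [Lst_length]; omega)] at h0
      have : (Lst pp k)[i + 0]'(by rw [Lst_length]; omega) = Jf pp k i := by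
        simpa using Lst_getElem pp k i hi
      rw [this] at h0
      simpa using h0.symm
    have ht : t = (Lst pp k).drop (i + 1) := by
      have := congrArg List.tail hrest
      simpa [List.tail_drop] using this
    rw [loopBk, hj]
    have hW : (i : Int) - (Jf pp k i : Int) + 1 = Wf pp k i := rfl
    rw [hW]
    set bucket' := bucket.set (Jf pp k i) (max (bucket.getD (Jf pp k i) 0) (Wf pp k i)) with hb'
    have hbinv : ∀ m, bucket'.getD m 0 = bk pp k (i + 1) m := by
      intro m
      by_cases hm : Jf pp k i = m
      · subst hm
        rw [hb']
        have hlt : Jf pp k i < bucket.length := by have := Jf_le pp k i; omega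
        simp only [List.getD, List.getElem?_set_self hlt, Option.getD_some]
        rw [show bucket[Jf pp k i]?.getD 0 = bk pp k i (Jf pp k i) from hb _]
        show _ = if Jf pp k i = Jf pp k i then max (bk pp k i (Jf pp k i)) (Wf pp k i) else _
        rw [if_pos rfl]
      · have : bucket'.getD m 0 = bucket.getD m 0 := by
          rw [hb']
          simp [List.getD, List.getElem?_set_ne hm]
        rw [this, hb m]
        show _ = if Jf pp k i = m then max (bk pp k i m) (Wf pp k i) else bk pp k i m
        rw [if_neg hm]
    exact ih (i + 1) bucket' ht (by simp at hlen ⊢; omega) (by simp [hb', hblen]) hbinv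

-- characterisation of B's backward pass
lemma loopB2_eq (pp : List Int) (k : Int) (bucket : List Int)
    (hb : ∀ m, bucket.getD m 0 = bk pp k pp.length m) :
    ∀ (c : Nat) (suf : List Int), c ≤ pp.length + 1 → suf.length = pp.length + 2 →
      (∀ m, c ≤ m → suf.getD m 0 = SUF pp k m) →
      ∀ m, (loopB2 bucket suf c).getD m 0 = SUF pp k m := by
  intro c
  induction c with
  | zero =>
    intro suf _ _ hsuf m
    exact hsuf m (by omega)
  | succ c ih =>
    intro suf hc hlen hsuf m
    rw [loopB2]
    apply ih _ (by omega) (by simp [hlen])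
    intro m' hm'
    by_cases hmc : m' = c
    · subst hmc
      have hlt : m' < suf.length := by omega
      simp only [List.getD, List.getElem?_set_self hlt, Option.getD_some]
      rw [show suf[m' + 1]?.getD 0 = SUF pp k (m' + 1) from hsuf (m' + 1) (by omega),
          show bucket[m']?.getD 0 = bk pp k pp.length m' from hb m',
          SUF_low pp k m' (by omega)]
    · have : (suf.set c (max (suf.getD (c + 1) 0) (bucket.getD c 0))).getD m' 0 = suf.getD m' 0 := by
        simp [List.getD, List.getElem?_set_ne (by omega : c ≠ m')]
      rw [this, hsuf m' (by omega)]

-- characterisation of B's pairing pass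
lemma loopB3_eq (pp : List Int) (k : Int) (suf : List Int)
    (hsuf : ∀ m, suf.getD m 0 = SUF pp k m) :
    ∀ (rest : List Nat) (i : Nat),
      rest = (Lst pp k).drop i → i + rest.length = pp.length →
      loopB3 suf rest i (RB pp k i) = RB pp k pp.length := by
  intro rest
  induction rest with
  | nil =>
    intro i hrest hlen
    have : i = pp.length := by simp at hlen; omega
    subst this; rfl
  | cons j t ih =>
    intro i hrest hlen
    have hi : i < pp.length := by simp at hlen; omega
    have hj : j = Jf pp k i := by
      have h0 : ((Lst pp k).drop i)[0]? = some j := by rw [← hrest]; rfl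
      rw [List.getElem?_drop, List.getElem?_eq_getElem (by rw [Lst_length]; omega)] at h0
      have : (Lst pp k)[i + 0]'(by rw [Lst_length]; omega) = Jf pp k i := by
        simpa using Lst_getElem pp k i hi
      rw [this] at h0
      simpa using h0.symm
    have ht : t = (Lst pp k).drop (i + 1) := by
      have := congrArg List.tail hrest
      simpa [List.tail_drop] using this
    rw [loopB3, hj, hsuf (i + 1)]
    have hW : (i : Int) - (Jf pp k i : Int) + 1 = Wf pp k i := rfl
    rw [hW]
    have hRB : max (RB pp k i) (Wf pp k i + SUF pp k (i + 1)) = RB pp k (i + 1) := rfl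
    rw [hRB]
    exact ih (i + 1) ht (by simp at hlen ⊢; omega)

-- ===== VERDICT (by name: the statement is the Claim_ definition above) =====
theorem maximizeWin1_spec : Claim_equal_maximizeWin1 := by
  intro pp k _
  unfold Spec_maximizeWin1 maximizeWin1 maximizeWin1_alt
  have hA : loopA pp k pp 0 (List.replicate (pp.length + 1) 0) 0 = RA pp k pp.length := by
    have h := loopA_eq pp k pp 0 (List.replicate (pp.length + 1) 0)
      (by simp) (by simp) (by simp)
      (by
        intro m
        cases m with
        | zero => simp [Pf]
        | succ m => rw [if_neg (by omega)]; simp)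
    exact h
  have hbk := loopBk_eq pp k (Lst pp k) 0 (List.replicate (pp.length + 1) 0)
    (by simp) (by simp [Lst_length]) (by simp)
    (by
      intro m
      rw [show bk pp k 0 m = (0 : Int) from rfl]
      simp [List.getD])
  have hsuf := loopB2_eq pp k _ hbk (pp.length + 1) (List.replicate (pp.length + 2) 0)
    (by omega) (by simp)
    (by
      intro m hm
      rw [SUF_high pp k m (by omega)]
      simp)
  have hB : loopB3 (loopB2 (loopBk (Lst pp k) 0 (List.replicate (pp.length + 1) 0))
      (List.replicate (pp.length + 2) 0) (pp.length + 1)) (Lst pp k) 0 0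
      = RB pp k pp.length := by
    have h := loopB3_eq pp k _ hsuf (Lst pp k) 0 (by simp) (by simp [Lst_length])
    exact h
  rw [hA]
  exact (hB.symm ▸ RA_eq_RB pp k : _)
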